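-- pv_equiv track=rewrite | github.com/SergeyOberemok/python-storybook | Algorithms/Words&Syllables/chunk_syllables_from_word.py | spinWordAround
-- ===== SOURCE A (Python) =====
-- def spinWord(word: str) -> str:
--     firstLetter = word[0]
--     rest = word[1:]
--     return ''.join([rest, firstLetter])
--
-- def spinWordAround(word: str) -> list[str]:
--     originalWord = word
--     spunList = [originalWord]
--     spun = spinWord(word)
--
--     while originalWord != spun:
--         spunList.append(spun)
--         spun = spinWord(spun)
--
--     return spunList
-- ===== SOURCE B (Python) =====
-- def spinWordAround(word: str) -> list[str]:
--     rotations = [word]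
--     for i in range(1, len(word)):
--         rotation = word[i:] + word[:i]
--         if rotation == word:
--             break
--         rotations.append(rotation)
--     return rotations
-- ===== Notes on version B (the rewrite author's own statement) =====
-- stated objective: alternative
-- what changed: B computes each rotation directly from the original word by slice index (word[i:]+word[:i]) in a bounded for-loop with break, instead of A's unbounded while-loop that repeatedly moves the first letter of the previous rotation to the end via a helper.
import Mathlib
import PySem

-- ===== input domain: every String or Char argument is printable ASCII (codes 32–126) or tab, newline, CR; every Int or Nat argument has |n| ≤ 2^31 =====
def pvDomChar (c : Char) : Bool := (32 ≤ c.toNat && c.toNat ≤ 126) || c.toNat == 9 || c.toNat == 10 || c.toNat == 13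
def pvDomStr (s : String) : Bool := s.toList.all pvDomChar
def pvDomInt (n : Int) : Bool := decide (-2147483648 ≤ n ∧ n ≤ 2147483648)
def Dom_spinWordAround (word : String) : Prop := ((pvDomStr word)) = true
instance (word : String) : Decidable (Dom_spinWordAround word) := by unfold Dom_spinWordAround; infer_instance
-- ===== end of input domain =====

-- B computes each rotation directly from the original word by index (word[i:]+word[:i]) with a bounded
-- loop + break, instead of A's unbounded while-loop rotating the previous result by one letter; same cost.


-- ===== PORT A =====
-- spinWord: firstLetter = word[0]; rest = word[1:]; return rest + firstLetter.
-- (word[1:] is .tail, [word[0]] is .take 1; on the empty string Python raises, excluded by Pre_.)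
def pvSpinWord (w : String) : String := String.ofList (w.toList.tail ++ w.toList.take 1)

-- the while-loop of A, with fuel (the loop returns to the original after at most len(word) rotations)
def pvLoopA (orig spun : String) (acc : List String) : Nat → List String
  | 0 => acc
  | f + 1 => if orig ≠ spun then pvLoopA orig (pvSpinWord spun) (acc ++ [spun]) f else acc

def spinWordAround (word : String) : List String :=
  pvLoopA word (pvSpinWord word) [word] word.toList.length

-- ===== PORT B =====
-- word[i:] + word[:i]
def pvRot (w : List Char) (i : Nat) : List Char := w.drop i ++ w.take i

-- the for-loop of B: i counts up from 1, fuel = number of remaining indices; break when rotation = word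
def pvLoopB (w : List Char) (i : Nat) : Nat → List (List Char)
  | 0 => []
  | f + 1 => if pvRot w i = w then [] else pvRot w i :: pvLoopB w (i + 1) f

def spinWordAround_alt (word : String) : List String :=
  word :: (pvLoopB word.toList 1 (word.toList.length - 1)).map String.ofList

-- ===== PRECONDITION & SPEC =====
-- A raises IndexError on the empty string (word[0]); that is the only excluded input.
def Pre_spinWordAround (word : String) : Prop := word ≠ ""
instance (word : String) : Decidable (Pre_spinWordAround word) := by unfold Pre_spinWordAround; infer_instance
def pvWitness_spinWordAround : String := "abab"

def Spec_spinWordAround (word : String) (out : List String) : Prop := out = spinWordAround_alt word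
instance (word : String) (out : List String) : Decidable (Spec_spinWordAround word out) := by unfold Spec_spinWordAround; infer_instance

-- ===== CLAIM (what is proved, stated in full; the proofs are below) =====
def Claim_equal_spinWordAround : Prop := ∀ (word : String), Dom_spinWordAround word → Pre_spinWordAround word → Spec_spinWordAround word (spinWordAround word)

-- ===== LEMMAS AND PROOFS =====

theorem pvOfList_inj {a b : List Char} (h : String.ofList a = String.ofList b) : a = b := by
  simpa using congrArg String.toList h

-- one step of A on a rotation of w is the next rotation of w
theorem pvSpinWord_rot (w : List Char) (i : Nat) (h2 : i < w.length) :
    pvSpinWord (String.ofList (pvRot w i)) = String.ofList (pvRot w (i + 1)) := by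
  have hd : w.drop i = w[i] :: w.drop (i + 1) := List.drop_eq_getElem_cons h2
  unfold pvSpinWord pvRot
  congr 1
  rw [String.toList_ofList]
  conv_rhs => rw [List.take_add_one, List.getElem?_eq_getElem h2]
  rw [hd]
  simp only [List.cons_append, List.tail_cons, List.take_succ_cons, List.take_zero,
    Option.toList_some, List.append_assoc]

theorem pvLoopA_succ (o s : String) (acc : List String) (f : Nat) :
    pvLoopA o s acc (f + 1) = if o ≠ s then pvLoopA o (pvSpinWord s) (acc ++ [s]) f else acc := rfl

theorem pvLoopB_succ (w : List Char) (i f : Nat) :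
    pvLoopB w i (f + 1) = if pvRot w i = w then [] else pvRot w i :: pvLoopB w (i + 1) f := rfl

-- lockstep: A's loop at rotation i with fuel (length - i) + 1 equals acc ++ B's remaining rotations
theorem pvLoop_eq (w : List Char) (k : Nat) : ∀ (i : Nat) (acc : List String),
    i + k = w.length →
    pvLoopA (String.ofList w) (String.ofList (pvRot w i)) acc (k + 1)
      = acc ++ (pvLoopB w i k).map String.ofList := by
  induction k with
  | zero =>
    intro i acc hik
    have hr : pvRot w i = w := by
      have : i = w.length := by omega
      simp [pvRot, this]
    simp [pvLoopA, pvLoopB, hr]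
  | succ k ih =>
    intro i acc hik
    have hlt : i < w.length := by omega
    by_cases hw : pvRot w i = w
    · simp [pvLoopA, pvLoopB, hw]
    · have hne : String.ofList w ≠ String.ofList (pvRot w i) := fun h => hw (pvOfList_inj h.symm)
      rw [pvLoopA_succ, pvLoopB_succ, if_pos hne, if_neg hw,
        pvSpinWord_rot w i hlt, ih (i + 1) (acc ++ [String.ofList (pvRot w i)]) (by omega)]
      simp

theorem spinWordAround_spec : Claim_equal_spinWordAround := by
  intro word _ hpre
  unfold Spec_spinWordAround spinWordAround spinWordAround_alt
  have hne : word.toList ≠ [] := fun h => hpre (by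
    have := congrArg String.ofList h; simpa using this)
  have hlen : 1 ≤ word.toList.length := by
    cases h : word.toList with
    | nil => exact absurd h hne
    | cons a l => simp
  have h1 : pvSpinWord word = String.ofList (pvRot word.toList 1) := by
    simp [pvSpinWord, pvRot, List.drop_one]
  have hw : word = String.ofList word.toList := by simp
  have hfuel : word.toList.length = (word.toList.length - 1) + 1 := by omega
  calc pvLoopA word (pvSpinWord word) [word] word.toList.length
      = pvLoopA (String.ofList word.toList) (String.ofList (pvRot word.toList 1)) [word]
          ((word.toList.length - 1) + 1) := by rw [← h1, ← hw, ← hfuel]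
    _ = [word] ++ (pvLoopB word.toList 1 (word.toList.length - 1)).map String.ofList :=
        pvLoop_eq word.toList (word.toList.length - 1) 1 [word] (by omega)
    _ = word :: (pvLoopB word.toList 1 (word.toList.length - 1)).map String.ofList := rfl
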